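-- pv_equiv track=rewrite | github.com/MrBrantCode/unitest_baseline | mut_generate/mist_train_taco/taco_2660/solution.py | find_days_to_cross_bridge
-- ===== SOURCE A (Python) =====
-- def find_days_to_cross_bridge(S: str) -> int:
--     # Split the string by '$' to get the lengths of the broken sections
--     broken_sections = map(len, S.split('$'))
--
--     # Initialize variables to keep track of the maximum gap encountered and the days required
--     max_gap = 0
--     days_required = 0
--
--     # Iterate through each broken section length
--     for gap in broken_sections:
--         if gap > max_gap:
--             # If the current gap is larger than the maximum gap encountered so far,
--             # it means we need an additional day to practice jumping this far
--             days_required += 1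
--             max_gap = gap
--
--     return days_required
-- ===== SOURCE B (Python) =====
-- def find_days_to_cross_bridge(S: str) -> int:
--     # Build the running-maximum table of gap lengths, then count its
--     # distinct positive values (each new record = one more practice day).
--     run_max = []
--     for part in S.split('$'):
--         prev = run_max[-1] if run_max else 0
--         run_max.append(max(prev, len(part)))
--     return len({m for m in run_max if m > 0})
-- ===== Notes on version B (the rewrite author's own statement) =====
-- stated objective: alternative
-- what changed: B builds the running-maximum table of gap lengths explicitly and returns the number of distinct positive values it contains (a set of record values), instead of A's single-pass counter with a max_gap accumulator.
import Mathlib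
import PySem

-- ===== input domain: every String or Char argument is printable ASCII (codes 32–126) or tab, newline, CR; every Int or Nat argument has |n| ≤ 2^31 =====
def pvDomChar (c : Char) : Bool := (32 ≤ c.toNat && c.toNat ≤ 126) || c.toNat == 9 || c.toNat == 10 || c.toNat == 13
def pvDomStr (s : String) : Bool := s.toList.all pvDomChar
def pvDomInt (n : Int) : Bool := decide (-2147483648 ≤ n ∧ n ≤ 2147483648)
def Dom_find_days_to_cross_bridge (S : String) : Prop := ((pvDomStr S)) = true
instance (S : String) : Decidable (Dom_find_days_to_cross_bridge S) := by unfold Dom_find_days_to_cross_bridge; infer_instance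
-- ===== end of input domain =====

-- B replaces A's single-pass record counter by building the running-maximum table of the
-- gap lengths and counting its distinct positive values as a set (objective: alternative).

-- ===== PORT A =====
-- A: fold over the gap lengths carrying (max_gap, days_required).
def find_days_to_cross_bridge (S : String) : Int :=
  let broken_sections := (((PySem.Str.split? S "$").getD []).map PySem.Str.len)
  (broken_sections.foldl
    (fun (st : Int × Int) gap => if gap > st.1 then (gap, st.2 + 1) else st)
    (0, 0)).2

-- ===== PORT B =====
-- B: build run_max (the running-max table), then count its distinct positive values.
def find_days_to_cross_bridge_alt (S : String) : Int :=
  let run_max : List Int :=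
    ((PySem.Str.split? S "$").getD []).foldl
      (fun acc part => acc ++ [max (acc.getLastD 0) (PySem.Str.len part)]) []
  ((PySem.Set.ofList (run_max.filter (fun m => m > 0))).length : Int)

-- ===== PRECONDITION & SPEC =====
def Spec_find_days_to_cross_bridge (S : String) (out : Int) : Prop := out = find_days_to_cross_bridge_alt S
instance (S : String) (out : Int) : Decidable (Spec_find_days_to_cross_bridge S out) := by unfold Spec_find_days_to_cross_bridge; infer_instance

-- ===== CLAIM (what is proved, stated in full; the proofs are below) =====
def Claim_equal_find_days_to_cross_bridge : Prop := ∀ (S : String), Dom_find_days_to_cross_bridge S → Spec_find_days_to_cross_bridge S (find_days_to_cross_bridge S)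

-- ===== LEMMAS AND PROOFS =====

-- the running-maximum table of gs with baseline m
def pvRml (m : Int) : List Int → List Int
  | [] => []
  | g :: gs => (max m g) :: pvRml (max m g) gs

-- the list of record values of gs above baseline m (strictly increasing)
def pvRec (m : Int) : List Int → List Int
  | [] => []
  | g :: gs => if g > m then g :: pvRec g gs else pvRec m gs

theorem pvRec_gt (gs : List Int) : ∀ m x, x ∈ pvRec m gs → m < x := by
  induction gs with
  | nil => intro m x h; simp [pvRec] at h
  | cons g gs ih =>
    intro m x h
    unfold pvRec at h
    split at h
    · rcases List.mem_cons.mp h with h | h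
      · omega
      · have := ih g x h; omega
    · exact ih m x h

-- A's fold counts exactly the records
theorem pvA_count (gs : List Int) : ∀ m d,
    (gs.foldl (fun (st : Int × Int) gap => if gap > st.1 then (gap, st.2 + 1) else st) (m, d)).2
      = d + (pvRec m gs).length := by
  induction gs with
  | nil => intro m d; simp [pvRec]
  | cons g gs ih =>
    intro m d
    by_cases h : g > m <;> simp [List.foldl_cons, h, pvRec, ih] <;> omega

-- B's fold builds the running-max table
theorem pvB_build (gs : List String) : ∀ (acc : List Int) m, acc.getLastD 0 = m →
    gs.foldl (fun acc part => acc ++ [max (acc.getLastD 0) (PySem.Str.len part)]) acc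
      = acc ++ pvRml m (gs.map PySem.Str.len) := by
  induction gs with
  | nil => intro acc m _; simp [pvRml]
  | cons g gs ih =>
    intro acc m hm
    simp only [List.foldl_cons, List.map_cons, pvRml, hm]
    rw [ih (acc ++ [max m (PySem.Str.len g)]) (max m (PySem.Str.len g)) (by simp)]
    simp

theorem pv_foldl_add_filter (l : List Int) : ∀ (acc : List Int),
    l.foldl PySem.Set.add acc = acc ++ (PySem.Set.ofList l).filter (fun y => ¬ y ∈ acc) := by
  induction l with
  | nil => intro acc; simp [PySem.Set.ofList]
  | cons y l ih =>
    intro acc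
    have hyl : PySem.Set.ofList (y :: l) = [y] ++ (PySem.Set.ofList l).filter (fun z => ¬ z ∈ [y]) := by
      rw [show PySem.Set.ofList (y :: l) = List.foldl PySem.Set.add [y] l from rfl, ih [y]]
    rw [List.foldl_cons, ih (PySem.Set.add acc y), hyl]
    by_cases hy : y ∈ acc
    · have hadd : PySem.Set.add acc y = acc := by
        simp [PySem.Set.add, List.contains_eq_mem, hy]
      rw [hadd]
      simp only [List.filter_append, List.filter_filter]
      have : List.filter (fun y_1 => decide ¬y_1 ∈ acc) [y] = [] := by
        simp [List.filter, hy]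
      rw [this, List.nil_append]
      congr 1
      apply List.filter_congr
      intro x _
      by_cases hx : x ∈ acc
      · simp [hx]
      · have : ¬ x ∈ ([y] : List Int) := by
          simp only [List.mem_singleton]; rintro rfl; exact hx hy
        simp [hx, this]
    · have hadd : PySem.Set.add acc y = acc ++ [y] := by
        simp [PySem.Set.add, List.contains_eq_mem, hy]
      rw [hadd]
      simp only [List.filter_append, List.filter_filter, List.append_assoc]
      congr 1
      have : List.filter (fun y_1 => decide ¬y_1 ∈ acc) [y] = [y] := by
        simp [List.filter, hy]
      rw [this]
      have h2 : List.filter (fun y_1 => decide (y_1 ∉ acc ++ [y])) (PySem.Set.ofList l)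
          = List.filter (fun a => decide (a ∉ acc) && decide (a ∉ [y])) (PySem.Set.ofList l) := by
        apply List.filter_congr
        intro x _
        by_cases h3 : x ∈ acc
        · simp [List.mem_append, h3]
        · by_cases h4 : x ∈ ([y] : List Int) <;> simp [List.mem_append, h3, h4]
      rw [h2]

theorem pv_ofList_cons (x : Int) (l : List Int) :
    PySem.Set.ofList (x :: l) = x :: (PySem.Set.ofList l).filter (fun y => y ≠ x) := by
  rw [show PySem.Set.ofList (x :: l) = List.foldl PySem.Set.add [x] l from rfl,
    pv_foldl_add_filter l [x]]
  simp only [List.mem_singleton, List.singleton_append]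

-- key lemma, positive-baseline version
theorem pv_set_rec_pos (gs : List Int) : ∀ m, 0 < m →
    PySem.Set.ofList (m :: (pvRml m gs).filter (fun x => 0 < x)) = m :: pvRec m gs := by
  induction gs with
  | nil => intro m _; simp [pvRml, pvRec, PySem.Set.ofList, PySem.Set.add]
  | cons g gs ih =>
    intro m hm
    by_cases h : g > m
    · have hg : 0 < max m g := by omega
      have hmx : max m g = g := by omega
      simp only [pvRml, pvRec, h, if_pos, List.filter_cons, hg, decide_true]
      rw [pv_ofList_cons, ih (max m g) hg, hmx]
      have hfilt : List.filter (fun y => decide (y ≠ m)) (g :: pvRec g gs) = g :: pvRec g gs := by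
        apply List.filter_eq_self.mpr
        intro x hx
        rcases List.mem_cons.mp hx with rfl | hx
        · simp; omega
        · have := pvRec_gt gs g x hx; simp; omega
      rw [hfilt]
    · have hmx : max m g = m := by omega
      simp only [pvRml, pvRec, h, hmx, List.filter_cons, hm, decide_true, if_true]
      have : PySem.Set.ofList (m :: m :: List.filter (fun x => decide (0 < x)) (pvRml m gs))
          = PySem.Set.ofList (m :: List.filter (fun x => decide (0 < x)) (pvRml m gs)) := by
        rw [PySem.Set.ofList_eq_foldl, PySem.Set.ofList_eq_foldl, List.foldl_cons, List.foldl_cons,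
          List.foldl_cons]
        congr 1
        simp [PySem.Set.add]
      rw [this, ih m hm]
      simp

-- key lemma at baseline 0, for lists of nonnegative gaps
theorem pv_set_rec_zero (gs : List Int) (hnn : ∀ x ∈ gs, 0 ≤ x) :
    PySem.Set.ofList ((pvRml 0 gs).filter (fun x => 0 < x)) = pvRec 0 gs := by
  induction gs with
  | nil => simp [pvRml, pvRec, PySem.Set.ofList]
  | cons g gs ih =>
    have hg0 : 0 ≤ g := hnn g (List.mem_cons_self ..)
    by_cases h : 0 < g
    · have hmx : max (0:Int) g = g := by omega
      simp only [pvRml, pvRec, h, if_pos, hmx, List.filter_cons, decide_true]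
      exact pv_set_rec_pos gs g h
    · have hg : g = 0 := by omega
      subst hg
      simp only [pvRml, pvRec, max_self, List.filter_cons]
      norm_num
      exact ih (fun x hx => hnn x (List.mem_cons_of_mem _ hx))

-- ===== VERDICT (by name: the statement is the Claim_ definition above) =====
theorem find_days_to_cross_bridge_spec : Claim_equal_find_days_to_cross_bridge := by
  intro S _
  show find_days_to_cross_bridge S = find_days_to_cross_bridge_alt S
  have hA : find_days_to_cross_bridge S
      = ((((PySem.Str.split? S "$").getD []).map PySem.Str.len).foldl
          (fun (st : Int × Int) gap => if gap > st.1 then (gap, st.2 + 1) else st) (0, 0)).2 := rfl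
  have hB : find_days_to_cross_bridge_alt S
      = ((PySem.Set.ofList ((((PySem.Str.split? S "$").getD []).foldl
            (fun acc part => acc ++ [max (acc.getLastD 0) (PySem.Str.len part)]) []).filter
            (fun m => m > 0))).length : Int) := rfl
  rw [hA, hB, pvB_build _ [] 0 rfl, List.nil_append, pvA_count,
    pv_set_rec_zero (((PySem.Str.split? S "$").getD []).map PySem.Str.len)
      (by intro x hx
          rcases List.mem_map.mp hx with ⟨s, _, rfl⟩
          simp [PySem.Str.len_eq])]
  simp
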